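-- pv_equiv track=rewrite | github.com/pypi-data/pypi-mirror-351 | packages/sympair/sympair-0.1.2.tar.gz/sympair-0.1.2/sympair/utils.py | symbol_number
-- ===== SOURCE A (Python) =====
-- def symbol_number(symbols):
--     """
--     ["Sr", "Ti", "O",  "O" , "O"] -> ["Sr1", "Ti1", "O1", "O2", "O3"]
--     """
--     symbol_dict = {}
--     new_symbols = []
--     for s in symbols:
--         if s not in symbol_dict:
--             symbol_dict[s] = 1
--         else:
--             symbol_dict[s] += 1
--         new_symbols.append(s + str(symbol_dict[s]))
--     return new_symbols
-- ===== SOURCE B (Python) =====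
-- def symbol_number(symbols):
--     """
--     ["Sr", "Ti", "O",  "O" , "O"] -> ["Sr1", "Ti1", "O1", "O2", "O3"]
--     """
--     return [s + str(symbols[:i + 1].count(s)) for i, s in enumerate(symbols)]
-- ===== Notes on version B (the rewrite author's own statement) =====
-- stated objective: simpler
-- what changed: Replaced the count-maintaining dict loop with a single comprehension that computes each occurrence number by counting the symbol in the prefix symbols[:i+1]; no state is carried across iterations.
import Mathlib
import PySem

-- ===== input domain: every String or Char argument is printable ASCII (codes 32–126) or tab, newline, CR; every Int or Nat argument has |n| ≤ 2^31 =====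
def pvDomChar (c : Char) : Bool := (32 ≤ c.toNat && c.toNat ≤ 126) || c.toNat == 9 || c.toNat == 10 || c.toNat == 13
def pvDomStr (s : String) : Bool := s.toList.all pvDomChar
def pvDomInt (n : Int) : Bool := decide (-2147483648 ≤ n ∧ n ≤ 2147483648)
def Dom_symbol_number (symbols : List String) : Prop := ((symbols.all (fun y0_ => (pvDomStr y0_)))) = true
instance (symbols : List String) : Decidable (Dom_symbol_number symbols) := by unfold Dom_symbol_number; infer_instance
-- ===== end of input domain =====

-- B replaces A's count-maintaining dict loop by a stateless comprehension that counts each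
-- symbol in the prefix symbols[:i+1] (simpler; no asymptotic speedup claimed).

-- ===== PORT A =====
def symbol_number (symbols : List String) : List String :=
  (symbols.foldl
    (fun (st : PySem.Dict String Int × List String) s =>
      let d' := if st.1.contains s = false then st.1.insert s 1 else st.1.modify s 0 (· + 1)
      (d', st.2 ++ [s ++ PySem.Int.toStr (d'.getD s 0)]))
    (PySem.Dict.empty, [])).2

-- ===== PORT B =====
def symbol_number_alt (symbols : List String) : List String :=
  (PySem.List.enumerate symbols 0).map (fun is =>
    is.2 ++ PySem.Int.toStr (((PySem.List.slice symbols none (some (is.1 + 1))).count is.2 : Int)))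

-- ===== PRECONDITION & SPEC =====
def Spec_symbol_number (symbols : List String) (out : List String) : Prop := out = symbol_number_alt symbols
instance (symbols : List String) (out : List String) : Decidable (Spec_symbol_number symbols out) := by unfold Spec_symbol_number; infer_instance

-- ===== CLAIM (what is proved, stated in full; the proofs are below) =====
def Claim_equal_symbol_number : Prop := ∀ (symbols : List String), Dom_symbol_number symbols → Spec_symbol_number symbols (symbol_number symbols)

-- ===== LEMMAS AND PROOFS =====

-- canonical form: result for the remaining list l, with p the already-processed prefix
def snGo (p l : List String) : List String :=
  match l with
  | [] => []
  | s :: l' => (s ++ PySem.Int.toStr ((p.count s : Int) + 1)) :: snGo (p ++ [s]) l'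

theorem symbol_number_foldl (l : List String) :
    ∀ (p : List String) (d : PySem.Dict String Int) (acc : List String),
    (∀ v, d.getD v 0 = (p.count v : Int)) →
    (l.foldl
      (fun (st : PySem.Dict String Int × List String) s =>
        let d' := if st.1.contains s = false then st.1.insert s 1 else st.1.modify s 0 (· + 1)
        (d', st.2 ++ [s ++ PySem.Int.toStr (d'.getD s 0)]))
      (d, acc)).2 = acc ++ snGo p l := by
  induction l with
  | nil => intro p d acc _; simp [snGo]
  | cons s l ih =>
    intro p d acc hd
    simp only [List.foldl_cons]
    set d' := if d.contains s = false then d.insert s 1 else d.modify s 0 (· + 1) with hd'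
    have hds : d'.getD s 0 = (p.count s : Int) + 1 := by
      rw [hd']
      by_cases hc : d.contains s = false
      · have h0 : (p.count s : Int) = 0 := by
          rw [← hd s, PySem.Dict.getD_of_not_contains _ _ hc]
        simp [hc, PySem.Dict.getD_insert_self, h0]
      · simp [hc, PySem.Dict.getD_modify_self, hd s]
    have hinv : ∀ v, d'.getD v 0 = ((p ++ [s]).count v : Int) := by
      intro v
      by_cases hv : v = s
      · subst hv
        rw [hds]; simp [List.count_append]
      · have hvd : d'.getD v 0 = d.getD v 0 := by
          rw [hd']
          by_cases hc : d.contains s = false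
          · rw [if_pos hc]
            exact PySem.Dict.getD_insert_of_ne _ _ _ hv
          · rw [if_neg hc]
            exact PySem.Dict.getD_modify_of_ne _ _ _ hv
        rw [hvd, hd v]
        simp [List.count_append, Ne.symm hv]
    rw [ih (p ++ [s]) d' _ hinv]
    simp [snGo, hds]

theorem symbol_number_alt_go (l : List String) :
    ∀ (p : List String),
    (PySem.List.enumerate l (p.length : Int)).map (fun is =>
      is.2 ++ PySem.Int.toStr (((PySem.List.slice (p ++ l) none (some (is.1 + 1))).count is.2 : Int)))
    = snGo p l := by
  induction l with
  | nil => intro p; simp [PySem.List.enumerate_nil, snGo]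
  | cons s l ih =>
    intro p
    rw [PySem.List.enumerate_cons, List.map_cons]
    simp only [show p ++ s :: l = (p ++ [s]) ++ l from by simp, snGo]
    have hs2 : PySem.List.slice ((p ++ [s]) ++ l) none (some ((p.length : Int) + 1)) = p ++ [s] := by
      rw [show (p.length : Int) + 1 = ((p.length + 1 : Nat) : Int) from by push_cast; ring,
          PySem.List.slice_to_natCast,
          List.take_append_of_le_length (by simp)]
      simp
    congr 1
    · rw [hs2]
      have hcnt : (((p ++ [s]).count s : Nat) : Int) = (p.count s : Int) + 1 := by
        simp [List.count_append]
      rw [hcnt]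
    · rw [show (p.length : Int) + 1 = (((p ++ [s]).length : Nat) : Int) from by simp]
      exact ih (p ++ [s])

-- ===== VERDICT (by name: the statement is the Claim_ definition above) =====
theorem symbol_number_spec : Claim_equal_symbol_number := by
  intro symbols _
  unfold Spec_symbol_number symbol_number symbol_number_alt
  rw [symbol_number_foldl symbols [] PySem.Dict.empty [] (by intro v; simp [PySem.Dict.getD_empty])]
  have := symbol_number_alt_go symbols []
  simpa using this.symm
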